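-- pv_equiv track=rewrite | github.com/MahsaMv/Math-project | تفریق.py | Tafriq_2_Tabe
-- ===== SOURCE A (Python) =====
-- def Tafriq_2_Tabe (input1, input2):
--     i=0
--     j=0
--     m=0
--     Tafazol = []
--     while len(input1) > len(input2):
--         input2=list(reversed(input2))
--         input2.append(0)
--         i+=1
--         input2=list(reversed(input2))
--
--     while len(input1) < len(input2):
--         input1 = list(reversed(input1))
--         input1.append(0)
--         j+=1
--         input1 = list(reversed(input1))
--
--     while m<len(input1):
--         a = int(input1[m]) - int(input2[m])
--         Tafazol.append(a)
--         m +=1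
--     return(Tafazol)
-- ===== SOURCE B (Python) =====
-- def Tafriq_2_Tabe(input1, input2):
--     r1 = input1[::-1]
--     r2 = input2[::-1]
--     out = []
--     for k in range(max(len(r1), len(r2))):
--         x = r1[k] if k < len(r1) else 0
--         y = r2[k] if k < len(r2) else 0
--         out.append(int(x) - int(y))
--     return out[::-1]
-- ===== Notes on version B (the rewrite author's own statement) =====
-- stated objective: simpler
-- what changed: B drops A's two zero-padding while-loops (each iteration rebuilding the shorter list with two reversals and an append) and its index-counter loop, and instead walks both lists once from the right with a fill value of 0, reversing the result at the end.
import Mathlib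
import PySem

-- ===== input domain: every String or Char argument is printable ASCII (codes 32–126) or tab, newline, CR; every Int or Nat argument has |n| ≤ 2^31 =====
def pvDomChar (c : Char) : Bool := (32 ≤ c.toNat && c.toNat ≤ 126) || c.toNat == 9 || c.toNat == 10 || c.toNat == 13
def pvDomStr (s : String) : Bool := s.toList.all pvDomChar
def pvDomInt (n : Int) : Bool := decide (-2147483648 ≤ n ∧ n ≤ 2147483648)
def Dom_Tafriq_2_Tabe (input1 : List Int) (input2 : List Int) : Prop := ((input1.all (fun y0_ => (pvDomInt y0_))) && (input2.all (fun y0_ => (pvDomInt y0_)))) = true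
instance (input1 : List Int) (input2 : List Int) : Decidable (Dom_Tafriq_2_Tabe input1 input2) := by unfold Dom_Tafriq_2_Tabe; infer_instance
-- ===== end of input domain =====

-- B replaces A's two zero-padding while-loops by a single right-to-left paired walk with 0 fill (objective: simpler).


-- ===== PORT A =====
-- the first/second while loop: while len(a) > len(b): b = list(reversed(b)); b.append(0); b = list(reversed(b))
def Tafriq_2_Tabe_pad (a b : List Int) : List Int :=
  if a.length > b.length then Tafriq_2_Tabe_pad a ((b.reverse.concat 0).reverse) else b
termination_by a.length - b.length
decreasing_by simp; omega

def Tafriq_2_Tabe (input1 : List Int) (input2 : List Int) : List Int :=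
  let input2' := Tafriq_2_Tabe_pad input1 input2
  let input1' := Tafriq_2_Tabe_pad input2' input1
  -- while m < len(input1'): append input1'[m] - input2'[m]; m is always in range, so getD is exact Python indexing here
  (List.range input1'.length).foldl (fun acc m => acc ++ [input1'.getD m 0 - input2'.getD m 0]) []

-- ===== PORT B =====
def Tafriq_2_Tabe_alt (input1 : List Int) (input2 : List Int) : List Int :=
  let r1 := input1.reverse
  let r2 := input2.reverse
  ((List.range (max r1.length r2.length)).foldl
    (fun acc k => acc ++ [(if k < r1.length then r1.getD k 0 else 0) -
                          (if k < r2.length then r2.getD k 0 else 0)]) []).reverse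

-- ===== PRECONDITION & SPEC =====
def Spec_Tafriq_2_Tabe (input1 : List Int) (input2 : List Int) (out : List Int) : Prop := out = Tafriq_2_Tabe_alt input1 input2
instance (input1 : List Int) (input2 : List Int) (out : List Int) : Decidable (Spec_Tafriq_2_Tabe input1 input2 out) := by unfold Spec_Tafriq_2_Tabe; infer_instance

-- ===== CLAIM (what is proved, stated in full; the proofs are below) =====
def Claim_equal_Tafriq_2_Tabe : Prop := ∀ (input1 : List Int) (input2 : List Int), Dom_Tafriq_2_Tabe input1 input2 → Spec_Tafriq_2_Tabe input1 input2 (Tafriq_2_Tabe input1 input2)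

-- ===== LEMMAS AND PROOFS =====

theorem foldl_append_map {α β : Type} (l : List α) (f : α → β) (acc : List β) :
    l.foldl (fun a x => a ++ [f x]) acc = acc ++ l.map f := by
  induction l generalizing acc with
  | nil => simp
  | cons x xs ih => simp [List.foldl, ih]

theorem pad_eq (a b : List Int) :
    Tafriq_2_Tabe_pad a b = List.replicate (a.length - b.length) 0 ++ b := by
  by_cases h : a.length > b.length
  · rw [Tafriq_2_Tabe_pad, if_pos h]
    have : (b.reverse.concat 0).reverse = 0 :: b := by simp
    rw [this, pad_eq]
    have hrep : a.length - b.length = (a.length - (0 :: b).length) + 1 := by simp; omega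
    rw [hrep, List.replicate_succ']
    simp
  · rw [Tafriq_2_Tabe_pad, if_neg h]
    have : a.length - b.length = 0 := by omega
    simp [this]
termination_by a.length - b.length
decreasing_by simp; omega

-- value at index m of the left-zero-padded list, read from the right
theorem padded_getD (x : List Int) (n m : Nat) (hL : x.length ≤ n) (hm : m < n) :
    (List.replicate (n - x.length) 0 ++ x).getD m 0 =
      (if n - 1 - m < x.length then x.reverse.getD (n - 1 - m) 0 else 0) := by
  by_cases hc : m < n - x.length
  · rw [List.getD_eq_getElem?_getD, List.getElem?_append_left (by simpa using hc)]
    rw [if_neg (by omega)]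
    simp [hc]
  · have hx : m - (n - x.length) < x.length := by omega
    rw [List.getD_eq_getElem?_getD, List.getElem?_append_right (by simp; omega)]
    rw [if_pos (by omega)]
    rw [List.getD_eq_getElem?_getD, List.getElem?_reverse (by omega)]
    simp only [List.length_replicate]
    congr 2
    omega

theorem core_sub (x y : List Int) (n : Nat) (hx : x.length ≤ n) (hy : y.length ≤ n)
    (hn : n = max x.length y.length) :
    (List.range n).map (fun m => (List.replicate (n - x.length) 0 ++ x).getD m 0 -
                                 (List.replicate (n - y.length) 0 ++ y).getD m 0)
  = ((List.range (max x.reverse.length y.reverse.length)).map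
      (fun k => (if k < x.reverse.length then x.reverse.getD k 0 else 0) -
                (if k < y.reverse.length then y.reverse.getD k 0 else 0))).reverse := by
  rw [show max x.reverse.length y.reverse.length = n from by simpa using hn.symm]
  apply List.ext_getElem
  · simp
  · intro m hm1 hm2
    simp only [List.length_map, List.length_range] at hm1
    rw [List.getElem_map, List.getElem_range, List.getElem_reverse]
    simp only [List.length_map, List.length_range]
    rw [List.getElem_map, List.getElem_range]
    rw [padded_getD x n m hx hm1, padded_getD y n m hy hm1]
    simp only [List.length_reverse]

theorem Tafriq_2_Tabe_spec : Claim_equal_Tafriq_2_Tabe := by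
  intro input1 input2 _
  unfold Spec_Tafriq_2_Tabe Tafriq_2_Tabe Tafriq_2_Tabe_alt
  simp only [foldl_append_map, List.nil_append, pad_eq]
  rw [show (List.replicate (input1.length - input2.length) (0:Int) ++ input2).length
        = max input1.length input2.length from by simp only [List.length_append, List.length_replicate]; omega]
  rw [show (List.replicate (max input1.length input2.length - input1.length) (0:Int) ++ input1).length
        = max input1.length input2.length from by simp only [List.length_append, List.length_replicate]; omega]
  rw [show List.replicate (input1.length - input2.length) (0:Int)
        = List.replicate (max input1.length input2.length - input2.length) 0 from by congr 1; omega]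
  exact core_sub input1 input2 (max input1.length input2.length)
    (le_max_left _ _) (le_max_right _ _) rfl
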